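-- pv_equiv track=rewrite | github.com/HarleyCoops/nanochatAquaRat | scripts/gcs_simple.py | find_latest_run
-- ===== SOURCE A (Python) =====
-- def find_latest_run(runs):
--     """Find the most recent run based on timestamp."""
--     if not runs:
--         return None
--
--     # Look for runs with timestamps (format: YYYYMMDD-HHMMSS)
--     timestamp_runs = []
--     other_runs = []
--
--     for run in runs:
--         if '-' in run and len(run.split('-')) >= 3:
--             parts = run.split('-')
--             if len(parts[0]) == 8 and len(parts[1]) == 6:  # YYYYMMDD-HHMMSS
--                 timestamp_runs.append(run)
--             else:
--                 other_runs.append(run)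
--         else:
--             other_runs.append(run)
--
--     if timestamp_runs:
--         return sorted(timestamp_runs)[-1]  # Most recent
--
--     return runs[-1]  # Fallback to last alphabetically
-- ===== SOURCE B (Python) =====
-- def find_latest_run(runs):
--     """Find the most recent run based on timestamp (single pass, no sort)."""
--     if not runs:
--         return None
--
--     best = None
--     for run in runs:
--         if '-' in run and len(run.split('-')) >= 3:
--             parts = run.split('-')
--             if len(parts[0]) == 8 and len(parts[1]) == 6:  # YYYYMMDD-HHMMSS
--                 if best is None or run > best:
--                     best = run
--
--     return best if best is not None else runs[-1]
-- ===== Notes on version B (the rewrite author's own statement) =====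
-- stated objective: simpler
-- what changed: Replaces the two filtered-list builds plus sort with a single running-max pass over runs (best accumulator), dropping the unused other_runs list and the sort entirely.
import Mathlib
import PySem

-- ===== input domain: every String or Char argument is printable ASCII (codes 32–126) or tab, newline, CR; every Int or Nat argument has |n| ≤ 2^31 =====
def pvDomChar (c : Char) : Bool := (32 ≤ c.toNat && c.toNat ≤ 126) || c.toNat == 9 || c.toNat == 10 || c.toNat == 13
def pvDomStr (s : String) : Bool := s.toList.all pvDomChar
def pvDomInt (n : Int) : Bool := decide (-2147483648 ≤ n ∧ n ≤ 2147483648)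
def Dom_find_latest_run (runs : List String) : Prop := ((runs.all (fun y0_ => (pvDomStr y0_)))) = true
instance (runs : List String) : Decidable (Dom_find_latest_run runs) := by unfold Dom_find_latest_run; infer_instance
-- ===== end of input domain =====

-- B replaces A's two filtered-list builds plus sort by a single running-max pass (simpler; no sort, no unused other_runs list).

-- shared shape test of both Pythons: run.split('-') and the YYYYMMDD-HHMMSS format conditions
abbrev pvParts (run : String) : List String := (PySem.Str.split? run "-").getD []
abbrev pvC1 (run : String) : Prop :=
  PySem.Str.isIn "-" run = true ∧ 3 ≤ (pvParts run).length
abbrev pvC2 (run : String) : Prop :=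
  PySem.Str.len (PySem.List.pyGetD (pvParts run) 0 "") = 8 ∧
  PySem.Str.len (PySem.List.pyGetD (pvParts run) 1 "") = 6

-- ===== PORT A =====
-- one loop step of A: classify `run` into (timestamp_runs, other_runs)
def pvStepA (acc : List String × List String) (run : String) : List String × List String :=
  if pvC1 run then
    if pvC2 run then (acc.1 ++ [run], acc.2)
    else (acc.1, acc.2 ++ [run])
  else (acc.1, acc.2 ++ [run])

def find_latest_run (runs : List String) : Option String :=
  if runs = [] then none
  else
    let acc := runs.foldl pvStepA ([], [])
    if acc.1 ≠ [] then
      PySem.List.pyGet? (PySem.List.sorted acc.1 (fun x => x) false) (-1)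
    else
      PySem.List.pyGet? runs (-1)

-- ===== PORT B =====
-- one loop step of B: keep the lexicographically largest timestamp-shaped run seen so far
def pvStepB (best : Option String) (run : String) : Option String :=
  if pvC1 run then
    if pvC2 run then
      match best with
      | none => some run
      | some b => if b < run then some run else best
    else best
  else best

def find_latest_run_alt (runs : List String) : Option String :=
  if runs = [] then none
  else
    match runs.foldl pvStepB none with
    | some b => some b
    | none => PySem.List.pyGet? runs (-1)

-- ===== PRECONDITION & SPEC =====
def Spec_find_latest_run (runs : List String) (out : Option String) : Prop := out = find_latest_run_alt runs
instance (runs : List String) (out : Option String) : Decidable (Spec_find_latest_run runs out) := by unfold Spec_find_latest_run; infer_instance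

-- ===== CLAIM (what is proved, stated in full; the proofs are below) =====
def Claim_equal_find_latest_run : Prop := ∀ (runs : List String), Dom_find_latest_run runs → Spec_find_latest_run runs (find_latest_run runs)

-- ===== LEMMAS AND PROOFS =====

-- the shape test as a Bool predicate (for List.filter)
def pvQ (run : String) : Bool := decide (pvC1 run) && decide (pvC2 run)

-- the running-max step on already-filtered input
def pvG (best : Option String) (run : String) : Option String :=
  match best with
  | none => some run
  | some b => if b < run then some run else best

theorem pvQ_eq (r : String) : pvQ r = true ↔ pvC1 r ∧ pvC2 r := by
  unfold pvQ
  rw [Bool.and_eq_true, decide_eq_true_iff, decide_eq_true_iff]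

theorem pvStepA_fst (runs : List String) (ts os : List String) :
    (runs.foldl pvStepA (ts, os)).1 = ts ++ runs.filter pvQ := by
  induction runs generalizing ts os with
  | nil => simp
  | cons r t ih =>
    rw [List.foldl_cons, List.filter_cons]
    by_cases h1 : pvC1 r
    · by_cases h2 : pvC2 r
      · have hs : pvStepA (ts, os) r = (ts ++ [r], os) := by
          unfold pvStepA; rw [if_pos h1, if_pos h2]
        rw [hs, if_pos ((pvQ_eq r).2 ⟨h1, h2⟩), ih]; simp
      · have hs : pvStepA (ts, os) r = (ts, os ++ [r]) := by
          unfold pvStepA; rw [if_pos h1, if_neg h2]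
        rw [hs, if_neg (fun hq => h2 ((pvQ_eq r).1 hq).2)]; exact ih _ _
    · have hs : pvStepA (ts, os) r = (ts, os ++ [r]) := by
        unfold pvStepA; rw [if_neg h1]
      rw [hs, if_neg (fun hq => h1 ((pvQ_eq r).1 hq).1)]; exact ih _ _

theorem pvStepB_eq (best : Option String) (run : String) :
    pvStepB best run = if pvQ run then pvG best run else best := by
  unfold pvStepB
  by_cases h1 : pvC1 run
  · rw [if_pos h1]
    by_cases h2 : pvC2 run
    · rw [if_pos h2, if_pos ((pvQ_eq run).2 ⟨h1, h2⟩)]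
      rfl
    · rw [if_neg h2, if_neg (fun hq => h2 ((pvQ_eq run).1 hq).2)]
  · rw [if_neg h1, if_neg (fun hq => h1 ((pvQ_eq run).1 hq).1)]

theorem pvFoldB_filter (runs : List String) (best : Option String) :
    runs.foldl pvStepB best = (runs.filter pvQ).foldl pvG best := by
  induction runs generalizing best with
  | nil => rfl
  | cons r t ih =>
    rw [List.foldl_cons, List.filter_cons, pvStepB_eq]
    by_cases h : pvQ r
    · rw [if_pos h, if_pos h, List.foldl_cons, ih]
    · rw [if_neg h, if_neg h, ih]

theorem pvG_some (b run : String) : pvG (some b) run = some (max b run) := by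
  rcases lt_or_ge b run with h | h
  · simp [pvG, h, max_eq_right h.le]
  · simp [pvG, not_lt_of_ge h, max_eq_left h]

theorem pvFoldG (t : List String) (b : String) :
    t.foldl pvG (some b) = some (t.foldl max b) := by
  induction t generalizing b with
  | nil => rfl
  | cons r u ih => simp [List.foldl_cons, pvG_some, ih]

theorem pvFoldlMax_mem (t : List String) (x : String) :
    t.foldl max x = x ∨ t.foldl max x ∈ t := by
  induction t generalizing x with
  | nil => simp
  | cons r u ih =>
    rw [List.foldl_cons]
    rcases ih (max x r) with h | h
    · rcases max_choice x r with hm | hm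
      · left; rw [h, hm]
      · right; rw [h, hm]; exact List.mem_cons_self
    · right; exact List.mem_cons_of_mem r h

theorem pvFoldlMax_le (t : List String) (x : String) :
    x ≤ t.foldl max x ∧ ∀ y ∈ t, y ≤ t.foldl max x := by
  induction t generalizing x with
  | nil => simp
  | cons r u ih =>
    rcases ih (max x r) with ⟨h1, h2⟩
    rw [List.foldl_cons]
    refine ⟨le_trans (le_max_left x r) h1, ?_⟩
    intro y hy
    rcases List.mem_cons.1 hy with hy | hy
    · rw [hy]; exact le_trans (le_max_right x r) h1
    · exact h2 y hy

theorem pvPairwise_getLast (s : List String) :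
    s.Pairwise (· ≤ ·) → ∀ h : s ≠ [], ∀ y ∈ s, y ≤ s.getLast h := by
  induction s with
  | nil => intro _ h; exact absurd rfl h
  | cons a t ih =>
    intro hp h y hy
    have ha := (List.pairwise_cons.1 hp).1
    have hpt := (List.pairwise_cons.1 hp).2
    by_cases ht : t = []
    · subst ht
      have hya : y = a := by simpa using hy
      subst hya; simp
    · rw [List.getLast_cons ht]
      rcases List.mem_cons.1 hy with hy' | hy'
      · subst hy'; exact ha _ (List.getLast_mem ht)
      · exact ih hpt ht y hy'

theorem pvSorted_getLast? (x : String) (t : List String) :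
    (PySem.List.sorted (x :: t) (fun s => s) false).getLast? = some (t.foldl max x) := by
  have hne : PySem.List.sorted (x :: t) (fun s => s) false ≠ [] := by
    simp [PySem.List.sorted_eq_nil_iff]
  rw [List.getLast?_eq_some_getLast hne]
  congr 1
  have hmem : (PySem.List.sorted (x :: t) (fun s => s) false).getLast hne ∈ x :: t := by
    rw [← PySem.List.mem_sorted (x :: t) (fun s => s) false]
    exact List.getLast_mem hne
  have hMmem : t.foldl max x ∈ x :: t := by
    rcases pvFoldlMax_mem t x with h | h
    · rw [h]; exact List.mem_cons_self
    · exact List.mem_cons_of_mem x h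
  have hMs : t.foldl max x ∈ PySem.List.sorted (x :: t) (fun s => s) false := by
    rw [PySem.List.mem_sorted]; exact hMmem
  have hp : (PySem.List.sorted (x :: t) (fun s => s) false).Pairwise (· ≤ ·) :=
    PySem.List.sorted_pairwise (x :: t) (fun s => s)
  have h1 : t.foldl max x ≤ (PySem.List.sorted (x :: t) (fun s => s) false).getLast hne :=
    pvPairwise_getLast _ hp hne _ hMs
  have h2 : (PySem.List.sorted (x :: t) (fun s => s) false).getLast hne ≤ t.foldl max x := by
    rcases pvFoldlMax_le t x with ⟨ha, hb⟩
    rcases List.mem_cons.1 hmem with h | h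
    · rw [h]; exact ha
    · exact hb _ h
  exact le_antisymm h2 h1

-- ===== VERDICT (by name: the statement is the Claim_ definition above) =====
theorem find_latest_run_spec : Claim_equal_find_latest_run := by
  intro runs _
  unfold Spec_find_latest_run
  by_cases hre : runs = []
  · simp [find_latest_run, find_latest_run_alt, hre]
  · rw [find_latest_run, find_latest_run_alt, if_neg hre, if_neg hre]
    have hA := pvStepA_fst runs [] []
    have hB := pvFoldB_filter runs none
    rcases hf : runs.filter pvQ with _ | ⟨x, t⟩
    · rw [hf] at hA hB
      simp only [List.nil_append] at hA
      simp [hA, hB]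
    · rw [hf] at hA hB
      simp only [List.nil_append] at hA
      have hB1 : runs.foldl pvStepB none = some (t.foldl max x) := by
        rw [hB, List.foldl_cons]
        show List.foldl pvG (pvG none x) t = _
        rw [show pvG none x = some x from rfl, pvFoldG]
      rw [hB1]
      simp only [hA]
      rw [if_pos (by simp : (x :: t : List String) ≠ [])]
      rw [PySem.List.pyGet?_neg_one, pvSorted_getLast?]
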